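-- pv_equiv track=rewrite | github.com/PorcoRosso85/home | bin/src/requirement/graph/search/fts/kuzu/fts_operations.py | validate_conjunctive_results
-- ===== SOURCE A (Python) =====
-- from typing import List, Dict, Any
--
-- def validate_conjunctive_results(results: List[Dict[str, Any]],
--                                query: str) -> List[Dict[str, Any]]:
--     """Filter results to ensure all query terms are present."""
--     query_terms = query.lower().split()
--     validated = []
--
--     for doc in results:
--         content = doc.get("title", "") + " " + doc.get("content", "")
--         if all(term in content.lower() for term in query_terms):
--             validated.append(doc)
--
--     return validated
-- ===== SOURCE B (Python) =====
-- def validate_conjunctive_results(results, query):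
--     """Filter results to ensure all query terms are present."""
--     terms = query.lower().split()
--
--     def contains_all(ts, text):
--         if not ts:
--             return True
--         return ts[0] in text and contains_all(ts[1:], text)
--
--     def go(docs):
--         if not docs:
--             return []
--         head = docs[0]
--         rest = go(docs[1:])
--         text = (head.get("title", "") + " " + head.get("content", "")).lower()
--         return [head] + rest if contains_all(terms, text) else rest
--
--     return go(results)
-- ===== Notes on version B (the rewrite author's own statement) =====
-- stated objective: alternative
-- what changed: Replaces A's accumulator loop with inner all() by structural recursion over the document list that builds the result back-to-front, with a hand-written recursive term-conjunction check and the lowered text computed once per doc.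
import Mathlib
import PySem

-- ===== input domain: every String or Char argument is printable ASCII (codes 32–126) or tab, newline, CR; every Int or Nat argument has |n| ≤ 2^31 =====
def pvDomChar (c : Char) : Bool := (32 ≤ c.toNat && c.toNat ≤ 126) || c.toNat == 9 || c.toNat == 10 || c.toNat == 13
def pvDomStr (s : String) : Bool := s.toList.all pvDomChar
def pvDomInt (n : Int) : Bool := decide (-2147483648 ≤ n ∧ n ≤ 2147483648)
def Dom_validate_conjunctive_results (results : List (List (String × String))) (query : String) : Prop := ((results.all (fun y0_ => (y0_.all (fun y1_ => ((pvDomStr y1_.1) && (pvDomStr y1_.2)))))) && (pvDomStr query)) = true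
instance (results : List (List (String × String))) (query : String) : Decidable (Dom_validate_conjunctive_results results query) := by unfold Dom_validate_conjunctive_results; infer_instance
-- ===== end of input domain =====

-- B replaces A's accumulator loop with inner all() by structural recursion over the
-- document list building the result back-to-front, with a hand-written recursive
-- term-conjunction check (alternative decomposition; same cost).

-- ===== PORT A =====
def validate_conjunctive_results (results : List (List (String × String))) (query : String) : List (List (String × String)) :=
  let query_terms := PySem.Str.split₀ (PySem.Str.lower query)
  results.foldl (fun validated doc =>
    let content := PySem.Dict.getD (PySem.Dict.mk doc) "title" "" ++ " " ++ PySem.Dict.getD (PySem.Dict.mk doc) "content" ""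
    if query_terms.all (fun term => PySem.Str.isIn term (PySem.Str.lower content))
    then validated ++ [doc] else validated) []

-- ===== PORT B =====
-- recursive conjunction over the term list (Source B's contains_all)
def pvContainsAll : List String → String → Bool
  | [], _ => true
  | t :: ts, text => PySem.Str.isIn t text && pvContainsAll ts text

-- structural recursion over the docs (Source B's go)
def pvGo (terms : List String) : List (List (String × String)) → List (List (String × String))
  | [] => []
  | head :: docs =>
    let rest := pvGo terms docs
    let text := PySem.Str.lower (PySem.Dict.getD (PySem.Dict.mk head) "title" "" ++ " " ++ PySem.Dict.getD (PySem.Dict.mk head) "content" "")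
    if pvContainsAll terms text then head :: rest else rest

def validate_conjunctive_results_alt (results : List (List (String × String))) (query : String) : List (List (String × String)) :=
  pvGo (PySem.Str.split₀ (PySem.Str.lower query)) results

-- ===== PRECONDITION & SPEC =====
def Spec_validate_conjunctive_results (results : List (List (String × String))) (query : String) (out : List (List (String × String))) : Prop := out = validate_conjunctive_results_alt results query
instance (results : List (List (String × String))) (query : String) (out : List (List (String × String))) : Decidable (Spec_validate_conjunctive_results results query out) := by unfold Spec_validate_conjunctive_results; infer_instance

-- ===== CLAIM (what is proved, stated in full; the proofs are below) =====
def Claim_equal_validate_conjunctive_results : Prop := ∀ (results : List (List (String × String))) (query : String), Dom_validate_conjunctive_results results query → Spec_validate_conjunctive_results results query (validate_conjunctive_results results query)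

-- ===== LEMMAS AND PROOFS =====

lemma pvContainsAll_eq_all (ts : List String) (text : String) :
    pvContainsAll ts text = ts.all (fun t => PySem.Str.isIn t text) := by
  induction ts with
  | nil => rfl
  | cons t ts ih => simp [pvContainsAll, ih]

lemma pvGo_eq_filter (terms : List String) (docs : List (List (String × String))) :
    pvGo terms docs = docs.filter (fun doc =>
      pvContainsAll terms (PySem.Str.lower (PySem.Dict.getD (PySem.Dict.mk doc) "title" "" ++ " " ++ PySem.Dict.getD (PySem.Dict.mk doc) "content" ""))) := by
  induction docs with
  | nil => rfl
  | cons d ds ih => simp only [pvGo, ih, List.filter_cons]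

theorem validate_conjunctive_results_spec : Claim_equal_validate_conjunctive_results := by
  intro results query _
  unfold Spec_validate_conjunctive_results validate_conjunctive_results validate_conjunctive_results_alt
  rw [pvGo_eq_filter, PySem.List.foldl_append_if_eq_filter]
  simp [pvContainsAll_eq_all]
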